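-- pv_equiv track=rewrite | github.com/GitMonsters/octotetrahedral-agi | arc-puzzle-catalog/re-arc/solves/381763ea/solver.py | transform
-- ===== SOURCE A (Python) =====
-- def transform(grid: list[list[int]]) -> list[list[int]]:
--     n = len(grid)
--     colors = set(c for row in grid for c in row)
--
--     if 9 in colors:
--         # Main diagonal: 9 at (i, i)
--         return [[9 if i == j else 7 for j in range(n)] for i in range(n)]
--     elif 4 in colors:
--         # Anti-diagonal: 9 at (i, n-1-i)
--         return [[9 if i + j == n - 1 else 7 for j in range(n)] for i in range(n)]
--     else:
--         # Only color 7 (no 4 or 9)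
--         if n % 4 == 0:
--             # Vertical line at rightmost column
--             return [[9 if j == n - 1 else 7 for j in range(n)] for i in range(n)]
--         else:
--             # Anti-diagonal
--             return [[9 if i + j == n - 1 else 7 for j in range(n)] for i in range(n)]
-- ===== SOURCE B (Python) =====
-- def transform(grid: list[list[int]]) -> list[list[int]]:
--     n = len(grid)
--     flat = [c for row in grid for c in row]
--
--     def diag(k: int) -> list[list[int]]:
--         # k x k grid with 9 on the main diagonal, built by peeling one row+column
--         if k == 0:
--             return []
--         return [[9] + [7] * (k - 1)] + [[7] + row for row in diag(k - 1)]
--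
--     if 9 in flat:
--         return diag(n)
--     if 4 in flat or n % 4 != 0:
--         # anti-diagonal is the row-wise mirror of the main diagonal
--         return [row[::-1] for row in diag(n)]
--     # vertical line: every row is the mirrored first diagonal row [7]*(n-1)+[9]
--     return [[7] * (n - 1) + [9] for _ in range(n)]
-- ===== Notes on version B (the rewrite author's own statement) =====
-- stated objective: alternative
-- what changed: Instead of three per-cell predicate comprehensions, B builds the main-diagonal grid once by structural recursion (peel the first row and first column) and derives the anti-diagonal by row-wise reversal and the vertical pattern by replicating the mirrored first diagonal row.
import Mathlib
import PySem

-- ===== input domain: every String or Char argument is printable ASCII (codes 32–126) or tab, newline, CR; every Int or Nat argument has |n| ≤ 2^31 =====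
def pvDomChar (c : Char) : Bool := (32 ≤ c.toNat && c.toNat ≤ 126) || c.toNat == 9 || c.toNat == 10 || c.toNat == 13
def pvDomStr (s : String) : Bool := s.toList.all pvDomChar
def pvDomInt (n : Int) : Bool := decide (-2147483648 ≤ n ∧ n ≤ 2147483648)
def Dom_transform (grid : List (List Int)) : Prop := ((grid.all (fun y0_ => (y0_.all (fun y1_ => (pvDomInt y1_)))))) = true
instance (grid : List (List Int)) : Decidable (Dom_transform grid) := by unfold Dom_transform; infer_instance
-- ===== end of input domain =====

-- B builds the main-diagonal grid once by structural recursion and derives the other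
-- patterns by row reversal / row replication, instead of A's per-cell predicate
-- comprehensions; return values proved equal.

-- ===== PORT A =====
def transform (grid : List (List Int)) : List (List Int) :=
  let n := grid.length
  let colors : PySem.Set Int := PySem.Set.ofList (grid.flatMap (fun row => row))
  if (9 : Int) ∈ colors then
    (List.range n).map (fun i => (List.range n).map (fun j => if i = j then (9 : Int) else 7))
  else if (4 : Int) ∈ colors then
    (List.range n).map (fun i => (List.range n).map (fun j => if i + j = n - 1 then (9 : Int) else 7))
  else if n % 4 = 0 then
    (List.range n).map (fun _ => (List.range n).map (fun j => if j = n - 1 then (9 : Int) else 7))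
  else
    (List.range n).map (fun i => (List.range n).map (fun j => if i + j = n - 1 then (9 : Int) else 7))

-- ===== PORT B =====
-- helper `diag` of Source B: k×k main-diagonal grid by peeling first row and column
def pvDiag : Nat → List (List Int)
  | 0 => []
  | k + 1 => ((9 : Int) :: List.replicate k (7 : Int)) ::
      (pvDiag k).map (fun row => (7 : Int) :: row)

def transform_alt (grid : List (List Int)) : List (List Int) :=
  let n := grid.length
  let flat := grid.flatMap (fun row => row)
  if (9 : Int) ∈ flat then pvDiag n
  else if (4 : Int) ∈ flat ∨ n % 4 ≠ 0 then (pvDiag n).map (fun row => row.reverse)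
  else (List.range n).map (fun _ => List.replicate (n - 1) (7 : Int) ++ [(9 : Int)])

-- ===== PRECONDITION & SPEC =====
def Spec_transform (grid : List (List Int)) (out : List (List Int)) : Prop := out = transform_alt grid
instance (grid : List (List Int)) (out : List (List Int)) : Decidable (Spec_transform grid out) := by unfold Spec_transform; infer_instance

-- ===== CLAIM (what is proved, stated in full; the proofs are below) =====
def Claim_equal_transform : Prop := ∀ (grid : List (List Int)), Dom_transform grid → Spec_transform grid (transform grid)

-- ===== LEMMAS AND PROOFS =====

theorem pvDiag_eq (n : Nat) :
    pvDiag n = (List.range n).map (fun i => (List.range n).map (fun j => if i = j then (9 : Int) else 7)) := by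
  induction n with
  | zero => rfl
  | succ k ih =>
    rw [pvDiag, ih]
    rw [List.range_succ_eq_map, List.map_cons, List.map_map, List.map_map]
    congr 1
    · rw [List.map_cons]
      congr 1
      rw [List.map_map]
      apply List.ext_getElem
      · simp
      · intro i h1 h2; simp
    · apply List.map_congr_left
      intro i hi
      simp only [Function.comp]
      rw [List.map_cons, List.map_map]
      congr 1
      apply List.map_congr_left
      intro j hj
      simp only [Function.comp, Nat.succ_eq_add_one]
      congr 1
      simp [Nat.add_right_cancel_iff]

theorem pvDiag_reverse (n : Nat) :
    (pvDiag n).map (fun row => row.reverse)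
      = (List.range n).map (fun i => (List.range n).map (fun j => if i + j = n - 1 then (9 : Int) else 7)) := by
  rw [pvDiag_eq, List.map_map]
  apply List.map_congr_left
  intro i hi
  rw [List.mem_range] at hi
  simp only [Function.comp]
  apply List.ext_getElem
  · simp
  · intro j h1 h2
    simp only [List.length_reverse, List.length_map, List.length_range] at h1
    rw [List.getElem_reverse, List.getElem_map, List.getElem_range,
      List.getElem_map, List.getElem_range]
    have : (i = (List.range n).length - 1 - j) ↔ (i + j = n - 1) := by
      simp only [List.length_range]; omega
    simp only [List.length_map] at *
    congr 1
    simp only [List.length_range, eq_iff_iff]; omega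

theorem vertical_row (n : Nat) (hn : 0 < n) :
    List.replicate (n - 1) (7 : Int) ++ [(9 : Int)]
      = (List.range n).map (fun j => if j = n - 1 then (9 : Int) else 7) := by
  obtain ⟨k, rfl⟩ : ∃ k, n = k + 1 := ⟨n - 1, by omega⟩
  · apply List.ext_getElem
    · simp
    · intro j h1 h2
      simp only [List.length_append, List.length_replicate, List.length_cons, List.length_nil] at h1
      rw [List.getElem_map, List.getElem_range]
      by_cases h : j < k
      · rw [List.getElem_append_left (by simpa using by omega), List.getElem_replicate]
        simp; omega
      · have hj : j = k := by omega
        subst hj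
        rw [List.getElem_append_right (by simp)]
        simp

-- ===== VERDICT (by name: the statement is the Claim_ definition above) =====
theorem transform_spec : Claim_equal_transform := by
  intro grid _
  unfold Spec_transform transform transform_alt
  set n := grid.length with hn
  have hmem : ∀ c : Int, (c ∈ PySem.Set.ofList (grid.flatMap (fun row => row)))
      ↔ c ∈ grid.flatMap (fun row => row) := by
    intro c; exact PySem.Set.mem_ofList (y := c) (xs := grid.flatMap (fun row => row))
  by_cases h9 : (9 : Int) ∈ grid.flatMap (fun row => row)
  · simp only [hmem, h9, if_pos]
    exact (pvDiag_eq n).symm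
  · by_cases h4 : (4 : Int) ∈ grid.flatMap (fun row => row)
    · simp only [hmem, h9, h4, ite_false, if_pos, true_or]
      exact (pvDiag_reverse n).symm
    · by_cases hm : n % 4 = 0
      · simp only [hmem, h9, h4, hm, ne_eq, not_true_eq_false, or_self, ite_true, ite_false]
        apply List.map_congr_left
        intro i hi
        exact (vertical_row n (by rw [List.mem_range] at hi; omega)).symm
      · simp only [hmem, h9, h4, hm, ne_eq, not_false_eq_true, or_true, ite_false, ite_true]
        exact (pvDiag_reverse n).symm
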